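-- pv_equiv track=rewrite | github.com/Sovik89/Scaler_inter_n_advanced | advanced_queue_perfect_number.py | solve
-- ===== SOURCE A (Python) =====
-- from queue import Queue
--
-- def solve(A):
--     my_queue=Queue(0)
--
--     ans=""
--     i=0
--     my_queue.put("1")
--     my_queue.put("2")
--
--     while i<A:
--         x=my_queue.get()
--
--         my_queue.put(x+"1")
--         my_queue.put(x+"2")
--
--         i+=1
--         ans=x+x[::-1]
--
--     return ans
-- ===== SOURCE B (Python) =====
-- def solve(A):
--     s = _bij(A)
--     return s + s[::-1]
--
-- def _bij(n):
--     # bijective base-2 numeral of n over digits {1,2} (the n-th BFS string)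
--     if n <= 0:
--         return ""
--     if n % 2 == 0:
--         return _bij((n - 2) // 2) + "2"
--     return _bij((n - 1) // 2) + "1"
-- ===== Notes on version B (the rewrite author's own statement) =====
-- stated objective: faster
-- what changed: Replaces the O(A)-step BFS queue simulation with a direct computation of the A-th {1,2}-string as the bijective base-2 numeral of A (O(log A) digits).
import Mathlib
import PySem

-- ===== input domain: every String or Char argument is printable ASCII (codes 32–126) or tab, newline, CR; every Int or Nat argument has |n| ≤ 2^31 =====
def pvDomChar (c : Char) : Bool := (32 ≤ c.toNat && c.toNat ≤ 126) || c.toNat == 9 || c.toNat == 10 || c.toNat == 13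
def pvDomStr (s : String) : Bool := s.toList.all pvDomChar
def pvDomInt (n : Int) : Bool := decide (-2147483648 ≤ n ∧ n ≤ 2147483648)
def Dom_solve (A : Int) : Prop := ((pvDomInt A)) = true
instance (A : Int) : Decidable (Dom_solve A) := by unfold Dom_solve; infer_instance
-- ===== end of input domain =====

-- B replaces A's O(A) BFS-queue simulation by computing the A-th {1,2}-string directly
-- as the bijective base-2 numeral of A (objective: faster, asymptotic).
-- Strings are ported on the List Char side (PySem style); x[::-1] is list reverse
-- (exact: PySem.List.slice?_none_none_neg_one).

-- ===== PORT A =====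
-- The queue is a FIFO list; the while loop runs max(A,0) = A.toNat times.
def solveLoopA : Nat → List (List Char) → List Char → List Char
  | 0, _, ans => ans
  | fuel+1, q, ans =>
    match q with
    | [] => ans  -- unreachable: the queue always holds ≥ 2 elements
    | x :: rest => solveLoopA fuel (rest ++ [x ++ ['1'], x ++ ['2']]) (x ++ x.reverse)

def solve (A : Int) : String :=
  String.ofList (solveLoopA A.toNat [['1'], ['2']] [])

-- ===== PORT B =====
-- transliteration of _bij from Source B
def bijChars (n : Int) : List Char :=
  if n ≤ 0 then []
  else if PySem.Int.mod n 2 = 0 then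
    bijChars (PySem.Int.floordiv (n - 2) 2) ++ ['2']
  else
    bijChars (PySem.Int.floordiv (n - 1) 2) ++ ['1']
termination_by n.toNat
decreasing_by
  · rw [PySem.Int.floordiv_eq_ediv_of_pos (by omega : (0:Int) < 2)]; omega
  · rw [PySem.Int.floordiv_eq_ediv_of_pos (by omega : (0:Int) < 2)]; omega

def solve_alt (A : Int) : String :=
  String.ofList (bijChars A ++ (bijChars A).reverse)

-- ===== PRECONDITION & SPEC =====
def Spec_solve (A : Int) (out : String) : Prop := out = solve_alt A
instance (A : Int) (out : String) : Decidable (Spec_solve A out) := by unfold Spec_solve; infer_instance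

-- ===== CLAIM (what is proved, stated in full; the proofs are below) =====
def Claim_equal_solve : Prop := ∀ (A : Int), Dom_solve A → Spec_solve A (solve A)

-- ===== LEMMAS AND PROOFS =====

-- numeral of a Nat index (proof-side abbreviation)
def numf (j : Nat) : List Char := bijChars (j : Int)

lemma bij_nonpos {n : Int} (h : n ≤ 0) : bijChars n = [] := by
  rw [bijChars]; simp [h]

lemma bij_odd (m : Nat) : bijChars (2*(m:Int)+1) = bijChars (m:Int) ++ ['1'] := by
  rw [bijChars]
  have h1 : ¬ (2*(m:Int)+1 ≤ 0) := by omega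
  have h2 : ¬ PySem.Int.mod (2*(m:Int)+1) 2 = 0 := by
    rw [PySem.Int.mod_eq_emod_of_pos (by omega : (0:Int) < 2)]; omega
  have h3 : PySem.Int.floordiv (2*(m:Int)+1 - 1) 2 = (m:Int) := by
    rw [PySem.Int.floordiv_eq_ediv_of_pos (by omega : (0:Int) < 2)]; omega
  rw [if_neg h1, if_neg h2, h3]

lemma bij_even (m : Nat) : bijChars (2*(m:Int)+2) = bijChars (m:Int) ++ ['2'] := by
  rw [bijChars]
  have h1 : ¬ (2*(m:Int)+2 ≤ 0) := by omega
  have h2 : PySem.Int.mod (2*(m:Int)+2) 2 = 0 := by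
    rw [PySem.Int.mod_eq_emod_of_pos (by omega : (0:Int) < 2)]; omega
  have h3 : PySem.Int.floordiv (2*(m:Int)+2 - 2) 2 = (m:Int) := by
    rw [PySem.Int.floordiv_eq_ediv_of_pos (by omega : (0:Int) < 2)]; omega
  rw [if_neg h1, if_pos h2, h3]

lemma numf_odd (k : Nat) : numf (2*k+3) = numf (k+1) ++ ['1'] := by
  simp only [numf]
  have h := bij_odd (k+1)
  have e : ((2*k+3 : Nat) : Int) = 2*((k+1 : Nat) : Int)+1 := by push_cast; ring
  rw [e]
  exact h

lemma numf_even (k : Nat) : numf (2*k+4) = numf (k+1) ++ ['2'] := by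
  simp only [numf]
  have h := bij_even (k+1)
  have e : ((2*k+4 : Nat) : Int) = 2*((k+1 : Nat) : Int)+2 := by push_cast; ring
  rw [e]
  exact h

-- queue invariant: at step k the queue holds the numerals of k+1 .. 2k+2
lemma loop_inv (fuel : Nat) : ∀ (k : Nat) (ans : List Char),
    solveLoopA fuel ((List.range' (k+1) (k+2)).map numf) ans
      = if fuel = 0 then ans else numf (k+fuel) ++ (numf (k+fuel)).reverse := by
  induction fuel with
  | zero => intro k ans; simp [solveLoopA]
  | succ fuel ih =>
    intro k ans
    rw [List.range'_succ, List.map_cons]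
    show solveLoopA fuel
        (((List.range' (k+2) (k+1)).map numf)
          ++ [numf (k+1) ++ ['1'], numf (k+1) ++ ['2']])
        (numf (k+1) ++ (numf (k+1)).reverse) = _
    have e1 : List.range' (k+2) (k+3) = List.range' (k+2) (k+1) ++ [2*k+3, 2*k+4] := by
      rw [show k+3 = (k+1)+1+1 from rfl, List.range'_concat, List.range'_concat]
      have a1 : (k+2)+1*(k+1) = 2*k+3 := by omega
      have a2 : (k+2)+1*((k+1)+1) = 2*k+4 := by omega
      rw [a1, a2, List.append_assoc]
      rfl
    have hnew : ((List.range' (k+2) (k+1)).map numf)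
          ++ [numf (k+1) ++ ['1'], numf (k+1) ++ ['2']]
        = (List.range' ((k+1)+1) ((k+1)+2)).map numf := by
      have : (k+1)+1 = k+2 := rfl
      rw [this, show (k+1)+2 = k+3 from rfl, e1, List.map_append,
          List.map_cons, List.map_cons, List.map_nil, numf_odd, numf_even]
    rw [hnew, ih (k+1)]
    cases fuel with
    | zero => simp
    | succ f =>
      rw [if_neg (Nat.succ_ne_zero f), if_neg (Nat.succ_ne_zero (f+1))]
      have e : k + 1 + (f+1) = k + (f+1+1) := by omega
      rw [e]

lemma numf_one : numf 1 = ['1'] := by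
  have h := bij_odd 0
  simp only [numf]
  norm_num at h ⊢
  rw [h, bij_nonpos (le_refl (0:Int))]
  rfl

lemma numf_two : numf 2 = ['2'] := by
  have h := bij_even 0
  simp only [numf]
  norm_num at h ⊢
  rw [h, bij_nonpos (le_refl (0:Int))]
  rfl

theorem solve_spec : Claim_equal_solve := by
  intro A _
  unfold Spec_solve solve solve_alt
  by_cases hA : A ≤ 0
  · have h0 : A.toNat = 0 := by omega
    rw [h0, bij_nonpos hA]
    simp [solveLoopA]
  · have hq : ([['1'], ['2']] : List (List Char)) = (List.range' (0+1) (0+2)).map numf := by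
      rw [show (0+2 : Nat) = 2 from rfl, show (0+1 : Nat) = 1 from rfl]
      rw [show List.range' 1 2 = [1, 2] from rfl, List.map_cons, List.map_cons, List.map_nil,
          numf_one, numf_two]
    rw [hq, loop_inv A.toNat 0 []]
    have hfz : A.toNat ≠ 0 := by omega
    rw [if_neg hfz]
    have hc : numf (0 + A.toNat) = bijChars A := by
      simp only [numf]
      congr 1
      omega
    rw [hc]

-- ===== VERDICT (by name: the statement is the Claim_ definition above) =====
-- theorem solve_spec is stated directly above.
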